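-- pv_equiv track=rewrite | github.com/bhavesh677/007 | PythonTest/test1/Q3.py | UL
-- ===== SOURCE A (Python) =====
-- def UL(mixstr):
--     n1=""
--     n2=""
--     for i in mixstr:
--         if i.islower():
--             n1=n1 + i
--
--         else:
--             n2=n2 + i
--
--     return n1 + n2
-- ===== SOURCE B (Python) =====
-- def UL(mixstr):
--     return "".join(sorted(mixstr, key=lambda c: not c.islower()))
-- ===== Notes on version B (the rewrite author's own statement) =====
-- stated objective: idiomatic
-- what changed: Replaces the two-accumulator concatenation loop by a single stable sort keyed on non-lowercase-ness, whose stability yields the same 'lowercase first, rest after, original order kept' result.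
import Mathlib
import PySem

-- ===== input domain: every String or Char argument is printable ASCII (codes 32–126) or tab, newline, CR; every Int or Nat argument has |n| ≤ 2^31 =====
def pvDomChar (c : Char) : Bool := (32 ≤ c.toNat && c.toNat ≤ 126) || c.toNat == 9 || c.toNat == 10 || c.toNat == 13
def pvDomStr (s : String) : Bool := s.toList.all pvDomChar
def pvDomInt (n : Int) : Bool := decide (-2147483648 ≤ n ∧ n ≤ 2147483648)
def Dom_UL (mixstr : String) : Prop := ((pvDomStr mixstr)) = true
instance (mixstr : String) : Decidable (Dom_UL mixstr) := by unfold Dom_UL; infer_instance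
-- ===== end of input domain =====

-- B replaces A's two-accumulator concatenation loop by one stable sort keyed on
-- non-lowercase-ness (idiomatic one-liner); stability keeps each group's order.

-- ===== PORT A =====
-- A: one pass, two string accumulators n1 (lowercase) and n2 (the rest), return n1+n2.
def UL (mixstr : String) : String :=
  let r := mixstr.toList.foldl
    (fun (acc : List Char × List Char) i =>
      if PySem.Chars.islower i then (acc.1 ++ [i], acc.2) else (acc.1, acc.2 ++ [i]))
    ([], [])
  String.ofList (r.1 ++ r.2)

-- ===== PORT B =====
-- B: ''.join(sorted(mixstr, key=lambda c: not c.islower())) — stable sort by the Bool key.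
def UL_alt (mixstr : String) : String :=
  String.ofList (PySem.List.sorted mixstr.toList (fun c => !PySem.Chars.islower c) false)

-- ===== PRECONDITION & SPEC =====
def Spec_UL (mixstr : String) (out : String) : Prop := out = UL_alt mixstr
instance (mixstr : String) (out : String) : Decidable (Spec_UL mixstr out) := by unfold Spec_UL; infer_instance

-- ===== CLAIM (what is proved, stated in full; the proofs are below) =====
def Claim_equal_UL : Prop := ∀ (mixstr : String), Dom_UL mixstr → Spec_UL mixstr (UL mixstr)

-- ===== LEMMAS AND PROOFS =====

-- the comparison B's stable insertion sort uses
def pvBf (a b : Char) : Bool := decide ((!PySem.Chars.islower a) < (!PySem.Chars.islower b))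

-- inserting a lowercase char into (lowers ++ others) lands right between the groups
lemma pv_insert_mid (x : Char) (hx : PySem.Chars.islower x = true) :
    ∀ (A B : List Char), (∀ a ∈ A, PySem.Chars.islower a = true) →
      (∀ b ∈ B, PySem.Chars.islower b = false) →
      PySem.List.insertBy pvBf x (A ++ B) = A ++ x :: B := by
  intro A
  induction A with
  | nil =>
    intro B _ hB
    cases B with
    | nil => simp [PySem.List.insertBy]
    | cons b B' =>
      have hb := hB b (by simp)
      simp [PySem.List.insertBy, pvBf, hx, hb]
  | cons a A' ih =>
    intro B hA hB
    have ha := hA a (by simp)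
    simp only [List.cons_append, PySem.List.insertBy, pvBf, hx, ha]
    simp [ih B (fun c hc => hA c (by simp [hc])) hB]

-- inserting a non-lowercase char appends it at the end
lemma pv_insert_end (x : Char) (hx : PySem.Chars.islower x = false) (ys : List Char) :
    PySem.List.insertBy pvBf x ys = ys ++ [x] := by
  apply PySem.List.insertBy_of_forall_not_before
  intro y _
  simp [pvBf, hx]

-- invariant of B's insertion-sort fold: groups accumulate in order
lemma pv_sort_inv (xs : List Char) :
    ∀ (A B : List Char), (∀ a ∈ A, PySem.Chars.islower a = true) →
      (∀ b ∈ B, PySem.Chars.islower b = false) →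
      xs.foldl (fun acc x => PySem.List.insertBy pvBf x acc) (A ++ B)
        = (A ++ xs.filter (fun c => PySem.Chars.islower c))
          ++ (B ++ xs.filter (fun c => !PySem.Chars.islower c)) := by
  induction xs with
  | nil => intro A B _ _; simp
  | cons x xs ih =>
    intro A B hA hB
    cases hx : PySem.Chars.islower x with
    | true =>
      have hA' : ∀ a ∈ A ++ [x], PySem.Chars.islower a = true := by
        intro a ha
        rcases List.mem_append.1 ha with h | h
        · exact hA a h
        · simp at h; simpa [h] using hx
      have hstep : PySem.List.insertBy pvBf x (A ++ B) = (A ++ [x]) ++ B := by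
        rw [pv_insert_mid x hx A B hA hB]; simp
      simp only [List.foldl_cons, hstep, ih (A ++ [x]) B hA' hB]
      simp [hx]
    | false =>
      have hB' : ∀ b ∈ B ++ [x], PySem.Chars.islower b = false := by
        intro b hb
        rcases List.mem_append.1 hb with h | h
        · exact hB b h
        · simp at h; simpa [h] using hx
      have hstep : PySem.List.insertBy pvBf x (A ++ B) = A ++ (B ++ [x]) := by
        rw [pv_insert_end x hx (A ++ B)]; simp
      simp only [List.foldl_cons, hstep, ih A (B ++ [x]) hA hB']
      simp [hx]

-- invariant of A's accumulating loop
lemma pv_foldA (xs : List Char) :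
    ∀ (n1 n2 : List Char),
      xs.foldl (fun (acc : List Char × List Char) i =>
          if PySem.Chars.islower i then (acc.1 ++ [i], acc.2) else (acc.1, acc.2 ++ [i]))
        (n1, n2)
      = (n1 ++ xs.filter (fun c => PySem.Chars.islower c),
         n2 ++ xs.filter (fun c => !PySem.Chars.islower c)) := by
  induction xs with
  | nil => intro n1 n2; simp
  | cons x xs ih =>
    intro n1 n2
    by_cases hx : PySem.Chars.islower x = true
    · simp [hx, ih]
    · have hx' : PySem.Chars.islower x = false := by simpa using hx
      simp [hx', ih]

-- ===== VERDICT (by name: the statement is the Claim_ definition above) =====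
theorem UL_spec : Claim_equal_UL := by
  intro mixstr _
  unfold Spec_UL UL UL_alt
  rw [PySem.List.sorted_eq_foldl_insertBy]
  have hB := pv_sort_inv mixstr.toList [] [] (by simp) (by simp)
  simp only [List.nil_append] at hB
  have : (fun acc x => PySem.List.insertBy
      (fun a b => decide ((!PySem.Chars.islower a) < (!PySem.Chars.islower b))) x acc)
      = (fun acc x => PySem.List.insertBy pvBf x acc) := rfl
  rw [this, hB, pv_foldA mixstr.toList [] []]
  simp
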